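-- pv_equiv track=rewrite | github.com/PaddleStroke/Bilingual-ebook-maker | bilingualEbook V5.py | findSectionBalises
-- ===== SOURCE A (Python) =====
-- def findSectionBalises(listeTexte):
-- 	balisesDesSections=[]
-- 	i=0
-- 	sectionouverte=0
-- 	vecteurainjecter=[]
-- 	vecteurainjecterTitle=[]
-- 	#numeroDeSection=1
-- 	while i<len(listeTexte):
-- 		if sectionouverte == 0:
-- 			indexBody = listeTexte[i].find("<section>")
-- 			if indexBody >= 0:
-- 				#vecteurainjecter.append(numeroDeSection)
-- 				#numeroDeSection+=1
-- 				vecteurainjecter.append(i)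
-- 				sectionouverte = 1
--
-- 		else:
-- 			indexTitle1 = listeTexte[i].find("<title>")
-- 			indexTitle2 = listeTexte[i].find("</title>")
-- 			if indexTitle1 >= 0 or indexTitle2 >= 0:
-- 				vecteurainjecterTitle.append(i)
--
-- 			indexBody = listeTexte[i].find("</section>")
-- 			if indexBody >= 0:
-- 				vecteurainjecter.append(i)
-- 				sectionouverte = 0
-- 				balisesDesSections.append([vecteurainjecter,vecteurainjecterTitle])
-- 				vecteurainjecter=[]
-- 				vecteurainjecterTitle=[]
--
-- 		i+=1
--
-- 	return balisesDesSections
-- ===== SOURCE B (Python) =====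
-- def findSectionBalises(listeTexte):
--     res = []
--     n = len(listeTexte)
--     i = 0
--     while i < n:
--         if "<section>" in listeTexte[i]:
--             titles = []
--             j = i + 1
--             closed = False
--             while j < n:
--                 if "<title>" in listeTexte[j] or "</title>" in listeTexte[j]:
--                     titles.append(j)
--                 if "</section>" in listeTexte[j]:
--                     res.append([[i, j], titles])
--                     closed = True
--                     break
--                 j += 1
--             if not closed:
--                 break
--             i = j + 1
--         else:
--             i += 1
--     return res
-- ===== Notes on version B (the rewrite author's own statement) =====
-- stated objective: alternative
-- what changed: A's single pass driven by a sectionouverte flag with persistent accumulators is replaced by nested loops: an outer scan for '<section>' and, per section, an inner scan from i+1 that collects title lines and stops at '</section>' (dangling sections dropped by breaking out).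
import Mathlib
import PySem

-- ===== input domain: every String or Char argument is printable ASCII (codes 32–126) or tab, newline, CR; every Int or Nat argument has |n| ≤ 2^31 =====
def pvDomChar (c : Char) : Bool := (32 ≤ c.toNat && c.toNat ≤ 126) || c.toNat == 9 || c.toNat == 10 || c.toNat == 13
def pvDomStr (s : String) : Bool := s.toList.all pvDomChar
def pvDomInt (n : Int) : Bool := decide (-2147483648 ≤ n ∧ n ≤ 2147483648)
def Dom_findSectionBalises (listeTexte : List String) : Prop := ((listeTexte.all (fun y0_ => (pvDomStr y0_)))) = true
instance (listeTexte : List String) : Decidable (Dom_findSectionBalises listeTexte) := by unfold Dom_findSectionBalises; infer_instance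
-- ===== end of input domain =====

-- B replaces A's single pass with a `sectionouverte` flag by nested loops (outer scan for
-- "<section>", inner scan from i+1 for titles and "</section>"); same return value (alternative decomposition).

-- ===== PORT A =====
-- A's while-loop, one recursive step per line (i = current index, sectionouverte as Bool,
-- vecteurainjecter / vecteurainjecterTitle / balisesDesSections as accumulators).
def findSectionBalisesA_loop : List String → Int → Bool → List Int → List Int →
    List (List (List Int)) → List (List (List Int))
  | [], _, _, _, _, acc => acc
  | line :: rest, i, sectionouverte, vec, vecT, acc =>
    if sectionouverte = false then
      if PySem.Str.find line "<section>" ≥ 0 then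
        findSectionBalisesA_loop rest (i + 1) true (vec ++ [i]) vecT acc
      else
        findSectionBalisesA_loop rest (i + 1) false vec vecT acc
    else
      let vecT' := if PySem.Str.find line "<title>" ≥ 0 ∨ PySem.Str.find line "</title>" ≥ 0
        then vecT ++ [i] else vecT
      if PySem.Str.find line "</section>" ≥ 0 then
        findSectionBalisesA_loop rest (i + 1) false [] [] (acc ++ [[vec ++ [i], vecT']])
      else
        findSectionBalisesA_loop rest (i + 1) true vec vecT' acc

def findSectionBalises (listeTexte : List String) : List (List (List Int)) :=
  findSectionBalisesA_loop listeTexte 0 false [] [] []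

-- ===== PORT B =====
-- inner loop of B: from line index j, collect title line indices; on the closing line return
-- (close index, titles, lines after the close); none if the section never closes.
def findSectionBalisesB_inner : List String → Int → List Int →
    Option (Int × List Int × List String)
  | [], _, _ => none
  | line :: rest, j, titles =>
    let titles' := if PySem.Str.isIn "<title>" line || PySem.Str.isIn "</title>" line
      then titles ++ [j] else titles
    if PySem.Str.isIn "</section>" line then some (j, titles', rest)
    else findSectionBalisesB_inner rest (j + 1) titles'

theorem findSectionBalisesB_inner_length {xs : List String} {j : Int} {t : List Int}
    {jc : Int} {t' : List Int} {ys : List String}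
    (h : findSectionBalisesB_inner xs j t = some (jc, t', ys)) : ys.length < xs.length := by
  induction xs generalizing j t with
  | nil => simp [findSectionBalisesB_inner] at h
  | cons line rest ih =>
    simp only [findSectionBalisesB_inner] at h
    split at h
    · simp_all
    · exact Nat.lt_succ_of_lt (ih h)

-- outer loop of B: scan for "<section>", hand over to the inner loop, resume after the close.
def findSectionBalisesB_outer : List String → Int → List (List (List Int)) →
    List (List (List Int))
  | [], _, acc => acc
  | line :: rest, i, acc =>
    if PySem.Str.isIn "<section>" line then
      match h : findSectionBalisesB_inner rest (i + 1) [] with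
      | some (jc, titles, rest') =>
        findSectionBalisesB_outer rest' (jc + 1) (acc ++ [[[i, jc], titles]])
      | none => acc
    else findSectionBalisesB_outer rest (i + 1) acc
termination_by xs _ _ => xs.length
decreasing_by
  · exact Nat.lt_succ_of_lt (findSectionBalisesB_inner_length h)
  · simp

def findSectionBalises_alt (listeTexte : List String) : List (List (List Int)) :=
  findSectionBalisesB_outer listeTexte 0 []

-- ===== PRECONDITION & SPEC =====
def Spec_findSectionBalises (listeTexte : List String) (out : List (List (List Int))) : Prop := out = findSectionBalises_alt listeTexte
instance (listeTexte : List String) (out : List (List (List Int))) : Decidable (Spec_findSectionBalises listeTexte out) := by unfold Spec_findSectionBalises; infer_instance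

-- ===== CLAIM (what is proved, stated in full; the proofs are below) =====
def Claim_equal_findSectionBalises : Prop := ∀ (listeTexte : List String), Dom_findSectionBalises listeTexte → Spec_findSectionBalises listeTexte (findSectionBalises listeTexte)

-- ===== LEMMAS AND PROOFS =====

-- "0 ≤ find" (A's test) agrees with "isIn" (B's test), at the Chars level the simp set normalises to
theorem find_nonneg_eq_isIn (sub s : List Char) :
    (0 ≤ PySem.Chars.find s sub) = (PySem.Chars.isIn sub s = true) := by
  simp only [eq_iff_iff]
  rw [PySem.Chars.find_nonneg_iff, PySem.Chars.isIn_iff_infix]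

-- A's loop with the section open (vecteurainjecter = [i0]) equals: run B's inner loop,
-- then resume A's loop in the closed state after the closing line.
theorem open_section_eq (xs : List String) : ∀ (j i0 : Int) (vecT : List Int)
    (acc : List (List (List Int))),
    findSectionBalisesA_loop xs j true [i0] vecT acc =
      match findSectionBalisesB_inner xs j vecT with
      | some (jc, t', rest') =>
          findSectionBalisesA_loop rest' (jc + 1) false [] [] (acc ++ [[[i0, jc], t']])
      | none => acc := by
  induction xs with
  | nil => intro j i0 vecT acc; simp [findSectionBalisesA_loop, findSectionBalisesB_inner]
  | cons line rest ih =>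
    intro j i0 vecT acc
    simp only [findSectionBalisesA_loop, findSectionBalisesB_inner, find_nonneg_eq_isIn,
      ge_iff_le, PySem.Str.find_eq, PySem.Str.isIn_eq, Bool.or_eq_true]
    by_cases hcl : PySem.Chars.isIn ['<', '/', 's', 'e', 'c', 't', 'i', 'o', 'n', '>'] line.toList = true
    · by_cases htl : (PySem.Chars.isIn ['<', 't', 'i', 't', 'l', 'e', '>'] line.toList = true ∨
          PySem.Chars.isIn ['<', '/', 't', 'i', 't', 'l', 'e', '>'] line.toList = true) <;>
        simp [htl, hcl]
    · by_cases htl : (PySem.Chars.isIn ['<', 't', 'i', 't', 'l', 'e', '>'] line.toList = true ∨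
          PySem.Chars.isIn ['<', '/', 't', 'i', 't', 'l', 'e', '>'] line.toList = true) <;>
        simp [htl, hcl, ih]

-- main lemma, by fuel induction on the list length (B's outer loop resumes on a strict suffix)
theorem closed_state_eq : ∀ (n : Nat) (xs : List String) (i : Int)
    (acc : List (List (List Int))), xs.length ≤ n →
    findSectionBalisesA_loop xs i false [] [] acc = findSectionBalisesB_outer xs i acc := by
  intro n
  induction n with
  | zero =>
    intro xs i acc h
    have : xs = [] := List.length_eq_zero_iff.mp (Nat.le_zero.mp h)
    subst this
    simp [findSectionBalisesA_loop, findSectionBalisesB_outer]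
  | succ n ih =>
    intro xs i acc h
    cases xs with
    | nil => simp [findSectionBalisesA_loop, findSectionBalisesB_outer]
    | cons line rest =>
      simp only [findSectionBalisesA_loop, findSectionBalisesB_outer,
        find_nonneg_eq_isIn, ge_iff_le, PySem.Str.find_eq, PySem.Str.isIn_eq]
      by_cases hsec : PySem.Chars.isIn "<section>".toList line.toList = true
      · simp only [if_pos hsec, List.nil_append]
        rw [open_section_eq]
        cases hin : findSectionBalisesB_inner rest (i + 1) [] with
        | none => simp
        | some v =>
          obtain ⟨jc, t', rest'⟩ := v
          have hlen : rest'.length < rest.length := findSectionBalisesB_inner_length hin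
          simp [ih rest' (jc + 1) (acc ++ [[[i, jc], t']]) (by simp at h; omega)]
      · simp only [if_neg hsec]
        exact ih rest (i + 1) acc (by simp at h; omega)

-- ===== VERDICT (by name: the statement is the Claim_ definition above) =====
theorem findSectionBalises_spec : Claim_equal_findSectionBalises := by
  intro listeTexte _
  unfold Spec_findSectionBalises findSectionBalises findSectionBalises_alt
  exact closed_state_eq listeTexte.length listeTexte 0 [] (le_refl _)
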